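-- pv_equiv track=rewrite | github.com/hanjoondev/zb-study | programmers/P86052.py | solution
-- ===== SOURCE A (Python) =====
-- def solution(grid):
--     h, w = len(grid), len(grid[0])
--     d = ((-1, 0), (0, 1), (1, 0), (0, -1))
--     t = {k: v for k, v in zip('SLR', (0, -1, 1))}
--     v = [[[False] * 4 for _ in range(w)] for _ in range(h)]
--     ans = []
--     for r in range(h):
--         for c in range(w):
--             for _d in range(4):
--                 if not v[r][c][_d]:
--                     started_from, length = (r, c, _d), 0
--                     while not v[r][c][_d]:
--                         v[r][c][_d] = True
--                         r, c = (r + d[_d][0]) % h, (c + d[_d][1]) % w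
--                         _d = (_d + t[grid[r][c]]) % 4
--                         length += 1
--                     if (r, c, _d) == started_from:
--                         ans.append(length)
--     return sorted(ans)
-- ===== SOURCE B (Python) =====
-- def solution(grid):
--     h, w = len(grid), len(grid[0])
--     moves = ((-1, 0), (0, 1), (1, 0), (0, -1))
--     off = {'S': 0, 'L': -1, 'R': 1}
--
--     def step(s):
--         r, c, d = s
--         nr, nc = (r + moves[d][0]) % h, (c + moves[d][1]) % w
--         return (nr, nc, (d + off[grid[nr][nc]]) % 4)
--
--     # The step map is a permutation of the states (r, c, d), so every state lies
--     # on exactly one cycle.  Count each cycle at its lexicographically smallest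
--     # state ("cycle leaders"): no visited marking is needed at all.
--     ans = []
--     for r in range(h):
--         for c in range(w):
--             for d in range(4):
--                 s = (r, c, d)
--                 cur, n = step(s), 1
--                 while cur > s:
--                     cur, n = step(cur), n + 1
--                 if cur == s:
--                     ans.append(n)
--     return sorted(ans)
-- ===== Notes on version B (the rewrite author's own statement) =====
-- stated objective: alternative
-- what changed: B replaces A's visited-array simulation with the memory-free cycle-leaders algorithm: since the move-then-turn step map is a permutation of the (r,c,d) states, B walks from every state and counts a cycle only when the walk returns to its start without ever passing a lexicographically smaller state, so no visited structure exists at all (it trades extra per-cycle walking for O(1) bookkeeping).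
import Mathlib
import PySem

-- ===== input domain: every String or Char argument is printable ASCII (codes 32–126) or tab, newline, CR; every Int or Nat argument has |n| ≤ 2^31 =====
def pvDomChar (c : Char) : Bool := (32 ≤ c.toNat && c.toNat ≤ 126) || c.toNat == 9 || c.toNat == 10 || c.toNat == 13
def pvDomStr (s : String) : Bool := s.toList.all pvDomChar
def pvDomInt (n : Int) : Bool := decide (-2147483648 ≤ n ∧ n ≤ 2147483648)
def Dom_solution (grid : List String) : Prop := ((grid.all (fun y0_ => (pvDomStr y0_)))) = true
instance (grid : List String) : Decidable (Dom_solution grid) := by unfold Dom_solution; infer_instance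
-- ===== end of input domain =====

-- B replaces A's visited-array simulation by the memory-free "cycle leaders" algorithm: the step
-- map is a permutation of the (r,c,d) states, and B counts a cycle exactly when the walk from a
-- state returns to it without ever passing a lexicographically smaller state (no visited storage).

abbrev PvSt := Int × Int × Int

-- ===== PORT A =====
-- d = ((-1,0),(0,1),(1,0),(0,-1))
def pvDirs : List (Int × Int) := [(-1, 0), (0, 1), (1, 0), (0, -1)]

-- t = {'S': 0, 'L': -1, 'R': 1}
def pvTurn : PySem.Dict Char Int :=
  ((PySem.Dict.empty.insert 'S' 0).insert 'L' (-1)).insert 'R' 1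

-- grid[r][c]; the defaults are only reached where the Python raises (outside Pre_)
def pvChar (grid : List String) (r c : Int) : Char :=
  PySem.List.pyGetD (PySem.List.pyGetD grid r "").toList c ' '

-- one step: r,c = (r+d[_d][0])%h,(c+d[_d][1])%w ; _d = (_d+t[grid[r][c]])%4 — shared literally
-- by both ports (it is A's loop body and B's local function `step`)
def pvStep (grid : List String) (h w : Int) (s : PvSt) : PvSt :=
  let m := PySem.List.pyGetD pvDirs s.2.2 (0, 0)
  let nr := PySem.Int.mod (s.1 + m.1) h
  let nc := PySem.Int.mod (s.2.1 + m.2) w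
  let nd := PySem.Int.mod (s.2.2 + pvTurn.getD (pvChar grid nr nc) 0) 4
  (nr, nc, nd)

-- A's while-loop: mark current state, step, count; stop on a visited state (fuel = #states+1 is a
-- totality guard only, never reached before the loop's own exit)
def pvWalkA (f : PvSt → PvSt) : Nat → PvSt → List PvSt → Int → PvSt × Int × List PvSt
  | 0, cur, vis, len => (cur, len, vis)
  | fuel + 1, cur, vis, len =>
    if cur ∈ vis then (cur, len, vis)
    else pvWalkA f fuel (f cur) (cur :: vis) (len + 1)

-- body of 'for _d in range(4)': r and c are threaded because A's while loop mutates them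
def pvBodyA (f : PvSt → PvSt) (fuel : Nat) (st : Int × Int × List PvSt × List Int) (dL : Int) :
    Int × Int × List PvSt × List Int :=
  if (st.1, st.2.1, dL) ∈ st.2.2.1 then st
  else
    let res := pvWalkA f fuel (st.1, st.2.1, dL) st.2.2.1 0
    (res.1.1, res.1.2.1, res.2.2,
      if res.1 = (st.1, st.2.1, dL) then st.2.2.2 ++ [res.2.1] else st.2.2.2)

-- body of 'for c in range(w)' (c is dropped after the inner loop, r is threaded)
def pvBodyC (f : PvSt → PvSt) (fuel : Nat) (acc2 : Int × List PvSt × List Int) (cL : Int) :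
    Int × List PvSt × List Int :=
  let r3 := (PySem.List.pyRange 0 4 1).foldl (pvBodyA f fuel) (acc2.1, cL, acc2.2.1, acc2.2.2)
  (r3.1, r3.2.2)

-- body of 'for r in range(h)'
def pvBodyR (f : PvSt → PvSt) (fuel : Nat) (w : Int) (acc : List PvSt × List Int) (rL : Int) :
    List PvSt × List Int :=
  ((PySem.List.pyRange 0 w 1).foldl (pvBodyC f fuel) (rL, acc)).2

def solution (grid : List String) : List Int :=
  let h : Int := grid.length
  let w : Int := PySem.Str.len (PySem.List.pyGetD grid 0 "")
  let fuel : Nat := (h * w * 4).toNat + 1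
  let res := (PySem.List.pyRange 0 h 1).foldl (pvBodyR (pvStep grid h w) fuel w) ([], [])
  PySem.List.sorted res.2 (fun x => x) false

-- ===== PORT B =====
-- Python tuple comparison 'a < b' on (r, c, d) triples, lexicographic
def pvLtB (a b : PvSt) : Bool :=
  a.1 < b.1 || (a.1 == b.1 && (a.2.1 < b.2.1 || (a.2.1 == b.2.1 && a.2.2 < b.2.2)))

-- B's while-loop: 'while cur > s: cur, n = step(cur), n + 1' (fuel = #states+1, a totality guard
-- only: the walk stops at latest when the cycle closes)
def pvWalkB (f : PvSt → PvSt) (s : PvSt) : Nat → PvSt → Int → PvSt × Int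
  | 0, cur, n => (cur, n)
  | fuel + 1, cur, n =>
    if pvLtB s cur then pvWalkB f s fuel (f cur) (n + 1) else (cur, n)

-- body of B's innermost loop: walk from s; append the count iff the walk closed at s
def pvBodyBalt (f : PvSt → PvSt) (fuel : Nat) (ans : List Int) (s : PvSt) : List Int :=
  let res := pvWalkB f s fuel (f s) 1
  if res.1 = s then ans ++ [res.2] else ans

def solution_alt (grid : List String) : List Int :=
  let h : Int := grid.length
  let w : Int := PySem.Str.len (PySem.List.pyGetD grid 0 "")
  let f := pvStep grid h w
  let fuel : Nat := (h * w * 4).toNat + 1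
  let ans := (PySem.List.pyRange 0 h 1).foldl (fun ans r =>
    (PySem.List.pyRange 0 w 1).foldl (fun ans c =>
      (PySem.List.pyRange 0 4 1).foldl (fun ans d => pvBodyBalt f fuel ans (r, c, d)) ans) ans) []
  PySem.List.sorted ans (fun x => x) false

-- ===== PRECONDITION & SPEC =====
-- Pre_ excludes exactly the inputs where Python A raises: the empty grid (IndexError on grid[0]),
-- a row shorter than the first row (IndexError), or a character in the first len(grid[0]) columns
-- of some row outside 'SLR' (KeyError on the turn table).
def Pre_solution (grid : List String) : Prop :=
  grid ≠ [] ∧ ∀ row ∈ grid,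
    (PySem.List.pyGetD grid 0 "").toList.length ≤ row.toList.length ∧
    ((row.toList.take (PySem.List.pyGetD grid 0 "").toList.length).all
      (fun ch => ch == 'S' || ch == 'L' || ch == 'R')) = true
instance (grid : List String) : Decidable (Pre_solution grid) := by
  unfold Pre_solution; infer_instance

def pvWitness_solution : List String := ["SL", "RS"]

def Spec_solution (grid : List String) (out : List Int) : Prop := out = solution_alt grid
instance (grid : List String) (out : List Int) : Decidable (Spec_solution grid out) := by
  unfold Spec_solution; infer_instance

-- ===== CLAIM (what is proved, stated in full; the proofs are below) =====
def Claim_equal_solution : Prop :=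
  ∀ (grid : List String), Dom_solution grid → Pre_solution grid → Spec_solution grid (solution grid)

-- ===== LEMMAS AND PROOFS =====

-- proof-only flat list of all states, and a flat version of A's per-state body
def pvStates (h w : Int) : List PvSt :=
  (PySem.List.pyRange 0 h 1).flatMap fun r =>
    (PySem.List.pyRange 0 w 1).flatMap fun c =>
      (PySem.List.pyRange 0 4 1).map fun d => (r, c, d)

def pvFlatA (f : PvSt → PvSt) (fuel : Nat) (st : List PvSt × List Int) (s : PvSt) :
    List PvSt × List Int :=
  if s ∈ st.1 then st
  else
    let res := pvWalkA f fuel s st.1 0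
    (res.2.2, if res.1 = s then st.2 ++ [res.2.1] else st.2)

def pvOrb (f : PvSt → PvSt) (s : PvSt) (n : Nat) : List PvSt :=
  (List.range n).map (fun i => f^[i] s)

def pvClosed (U : List PvSt) (f : PvSt → PvSt) (vis : List PvSt) : Prop :=
  ∀ x ∈ vis, x ∈ U ∧ f x ∈ vis

-- ---- order lemmas for pvLtB ----

lemma pvLt_irrefl (a : PvSt) : pvLtB a a = false := by
  obtain ⟨a1, a2, a3⟩ := a; simp [pvLtB]

lemma pvLt_asymm {a b : PvSt} (h1 : pvLtB a b = true) (h2 : pvLtB b a = true) : False := by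
  obtain ⟨a1, a2, a3⟩ := a; obtain ⟨b1, b2, b3⟩ := b
  simp [pvLtB] at h1 h2; omega

lemma pvLt_total {a b : PvSt} (h1 : pvLtB a b = false) (h2 : a ≠ b) : pvLtB b a = true := by
  obtain ⟨a1, a2, a3⟩ := a; obtain ⟨b1, b2, b3⟩ := b
  simp [pvLtB, Prod.mk.injEq] at *; omega

-- ---- generic permutation/orbit lemmas ----

lemma pv_iter_mem (U : List PvSt) (f : PvSt → PvSt) (hmap : ∀ s ∈ U, f s ∈ U)
    {s : PvSt} (hs : s ∈ U) : ∀ n, f^[n] s ∈ U := by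
  intro n
  induction n with
  | zero => simpa using hs
  | succ n ih => rw [Function.iterate_succ_apply']; exact hmap _ ih

lemma pv_iter_cancel (U : List PvSt) (f : PvSt → PvSt) (hmap : ∀ s ∈ U, f s ∈ U)
    (hinj : ∀ a ∈ U, ∀ b ∈ U, f a = f b → a = b) :
    ∀ k (a b : PvSt), a ∈ U → b ∈ U → f^[k] a = f^[k] b → a = b := by
  intro k
  induction k with
  | zero => intro a b _ _ h; simpa using h
  | succ k ih =>
    intro a b ha hb h
    rw [Function.iterate_succ_apply, Function.iterate_succ_apply] at h
    exact hinj _ ha _ hb (ih _ _ (hmap _ ha) (hmap _ hb) h)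

lemma pv_exists_period (U : List PvSt) (f : PvSt → PvSt) (hmap : ∀ s ∈ U, f s ∈ U)
    (hinj : ∀ a ∈ U, ∀ b ∈ U, f a = f b → a = b) {s : PvSt} (hs : s ∈ U) :
    ∃ n, 0 < n ∧ n ≤ U.length ∧ f^[n] s = s := by
  have hcard : U.toFinset.card < (Finset.range (U.length + 1)).card := by
    rw [Finset.card_range]
    exact Nat.lt_succ_of_le (U.toFinset_card_le)
  have hmaps : ∀ i ∈ Finset.range (U.length + 1), f^[i] s ∈ U.toFinset := by
    intro i _; rw [List.mem_toFinset]; exact pv_iter_mem U f hmap hs i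
  obtain ⟨i, hi, j, hj, hne, heq⟩ :=
    Finset.exists_ne_map_eq_of_card_lt_of_maps_to hcard hmaps
  simp only [Finset.mem_range] at hi hj
  rcases Nat.lt_or_ge i j with hij | hij
  · refine ⟨j - i, by omega, by omega, ?_⟩
    have : f^[i] (f^[j - i] s) = f^[i] s := by
      rw [← Function.iterate_add_apply]
      rw [show i + (j - i) = j by omega]
      exact heq.symm
    exact pv_iter_cancel U f hmap hinj i _ _ (pv_iter_mem U f hmap hs _) hs this
  · have hij' : j < i := by omega
    refine ⟨i - j, by omega, by omega, ?_⟩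
    have : f^[j] (f^[i - j] s) = f^[j] s := by
      rw [← Function.iterate_add_apply]
      rw [show j + (i - j) = i by omega]
      exact heq
    exact pv_iter_cancel U f hmap hinj j _ _ (pv_iter_mem U f hmap hs _) hs this

-- the MINIMAL period (what both walks actually produce)
lemma pv_min_period (U : List PvSt) (f : PvSt → PvSt) (hmap : ∀ s ∈ U, f s ∈ U)
    (hinj : ∀ a ∈ U, ∀ b ∈ U, f a = f b → a = b) {s : PvSt} (hs : s ∈ U) :
    ∃ p, 0 < p ∧ p ≤ U.length ∧ f^[p] s = s ∧ ∀ m, 0 < m → m < p → f^[m] s ≠ s := by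
  obtain ⟨n, hn0, hnle, hnp⟩ := pv_exists_period U f hmap hinj hs
  have hex : ∃ m, 0 < m ∧ f^[m] s = s := ⟨n, hn0, hnp⟩
  refine ⟨Nat.find hex, (Nat.find_spec hex).1,
    le_trans (Nat.find_min' hex ⟨hn0, hnp⟩) hnle, (Nat.find_spec hex).2, ?_⟩
  intro m hm0 hmp hms
  exact Nat.find_min hex hmp ⟨hm0, hms⟩

lemma pv_iter_period_mul (f : PvSt → PvSt) {s : PvSt} {p : Nat} (hpp : f^[p] s = s) :
    ∀ k, f^[k * p] s = s := by
  intro k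
  induction k with
  | zero => simp
  | succ k ih =>
    have : (k + 1) * p = k * p + p := by ring
    rw [this, Function.iterate_add_apply, hpp, ih]

lemma pv_iter_mod (f : PvSt → PvSt) {s : PvSt} {p : Nat} (hp0 : 0 < p)
    (hpp : f^[p] s = s) (n : Nat) : f^[n] s = f^[n % p] s := by
  conv_lhs => rw [show n = n % p + p * (n / p) from (Nat.mod_add_div n p).symm]
  rw [Function.iterate_add_apply, mul_comm, pv_iter_period_mul f hpp]

-- y reachable from x ⇒ x reachable from y (both on the same finite cycle)
lemma pv_reach_symm (f : PvSt → PvSt) {t s : PvSt} {n q : Nat} (hq0 : 0 < q)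
    (hqq : f^[q] t = t) (hn : f^[n] t = s) : ∃ j, f^[j] s = t := by
  refine ⟨q * (n + 1) - n, ?_⟩
  rw [← hn, ← Function.iterate_add_apply, show q * (n + 1) - n + n = (n + 1) * q by
    have : n + 1 ≤ q * (n + 1) := Nat.le_mul_of_pos_left _ hq0
    cases q with
    | zero => omega
    | succ q' => ring_nf; omega]
  exact pv_iter_period_mul f hqq (n + 1)

lemma pv_pre_closed (U : List PvSt) (f : PvSt → PvSt)
    (hinj : ∀ a ∈ U, ∀ b ∈ U, f a = f b → a = b) {vis : List PvSt}
    (hC : pvClosed U f vis) (hnd : vis.Nodup) :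
    ∀ x ∈ U, f x ∈ vis → x ∈ vis := by
  intro x hxU hfx
  have hsub : (vis.map f).toFinset ⊆ vis.toFinset := by
    intro y hy
    rw [List.mem_toFinset, List.mem_map] at hy
    obtain ⟨z, hz, rfl⟩ := hy
    rw [List.mem_toFinset]
    exact (hC z hz).2
  have hndm : (vis.map f).Nodup := by
    refine List.Nodup.map_on ?_ hnd
    intro a ha b hb hab
    exact hinj a (hC a ha).1 b (hC b hb).1 hab
  have hcard : vis.toFinset.card ≤ (vis.map f).toFinset.card := by
    rw [List.toFinset_card_of_nodup hnd, List.toFinset_card_of_nodup hndm,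
      List.length_map]
  have heq : (vis.map f).toFinset = vis.toFinset := Finset.eq_of_subset_of_card_le hsub hcard
  have : f x ∈ (vis.map f).toFinset := by rw [heq, List.mem_toFinset]; exact hfx
  rw [List.mem_toFinset, List.mem_map] at this
  obtain ⟨z, hz, hzx⟩ := this
  have := hinj z (hC z hz).1 x hxU hzx
  rwa [← this]

lemma pv_orbit_not_vis (U : List PvSt) (f : PvSt → PvSt)
    (hmap : ∀ s ∈ U, f s ∈ U) (hinj : ∀ a ∈ U, ∀ b ∈ U, f a = f b → a = b)
    {vis : List PvSt} (hC : pvClosed U f vis) (hnd : vis.Nodup)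
    {s : PvSt} (hs : s ∈ U) (hsv : s ∉ vis) : ∀ i, f^[i] s ∉ vis := by
  intro i
  induction i with
  | zero => simpa using hsv
  | succ i ih =>
    intro hmem
    rw [Function.iterate_succ_apply'] at hmem
    exact ih (pv_pre_closed U f hinj hC hnd _ (pv_iter_mem U f hmap hs i) hmem)

lemma pv_orbit_inj (U : List PvSt) (f : PvSt → PvSt)
    (hmap : ∀ s ∈ U, f s ∈ U) (hinj : ∀ a ∈ U, ∀ b ∈ U, f a = f b → a = b)
    {s : PvSt} (hs : s ∈ U) {p : Nat}
    (hmin : ∀ m, 0 < m → m < p → f^[m] s ≠ s) :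
    ∀ i j, i < p → j < p → f^[i] s = f^[j] s → i = j := by
  have key : ∀ i j, i < j → j < p → f^[i] s ≠ f^[j] s := by
    intro i j hij hjp heq
    have : f^[i] (f^[j - i] s) = f^[i] s := by
      rw [← Function.iterate_add_apply, show i + (j - i) = j by omega]
      exact heq.symm
    have := pv_iter_cancel U f hmap hinj i _ _ (pv_iter_mem U f hmap hs _) hs this
    exact hmin (j - i) (by omega) (by omega) this
  intro i j hip hjp heq
  rcases Nat.lt_trichotomy i j with h | h | h
  · exact absurd heq (key i j h hjp)
  · exact h
  · exact absurd heq.symm (key j i h hip)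

lemma pvOrb_succ (f : PvSt → PvSt) (s : PvSt) (n : Nat) :
    pvOrb f s (n + 1) = pvOrb f s n ++ [f^[n] s] := by
  simp [pvOrb, List.range_succ]

lemma pv_mem_pvOrb {f : PvSt → PvSt} {s x : PvSt} {n : Nat} :
    x ∈ pvOrb f s n ↔ ∃ i, i < n ∧ f^[i] s = x := by
  simp only [pvOrb, List.mem_map, List.mem_range]

-- ---- A's while-loop, run on a whole cycle ----

lemma pvWalkA_run (U : List PvSt) (f : PvSt → PvSt)
    (hmap : ∀ s ∈ U, f s ∈ U) (hinj : ∀ a ∈ U, ∀ b ∈ U, f a = f b → a = b)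
    {vis : List PvSt} (hC : pvClosed U f vis) (hnd : vis.Nodup)
    {s : PvSt} (hs : s ∈ U) (hsv : s ∉ vis) {p : Nat} (len0 : Int)
    (hp0 : 0 < p) (hpp : f^[p] s = s) (hmin : ∀ m, 0 < m → m < p → f^[m] s ≠ s) :
    ∀ m k i, i + m = p →
      pvWalkA f (m + 1 + k) (f^[i] s) ((pvOrb f s i).reverse ++ vis) (len0 + i)
        = (s, len0 + p, (pvOrb f s p).reverse ++ vis) := by
  intro m
  induction m with
  | zero =>
    intro k i hip
    have hi : i = p := by omega
    subst hi
    show pvWalkA f (0 + 1 + k) _ _ _ = _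
    rw [show 0 + 1 + k = k + 1 by omega]
    simp only [pvWalkA]
    rw [if_pos]
    · rw [hpp]
    · rw [hpp]
      simp only [List.mem_append, List.mem_reverse]
      exact Or.inl (pv_mem_pvOrb.mpr ⟨0, hp0, rfl⟩)
  | succ m ih =>
    intro k i hip
    rw [show m + 1 + 1 + k = (m + 1 + k) + 1 by omega]
    simp only [pvWalkA]
    rw [if_neg]
    · have h1 : f (f^[i] s) = f^[i + 1] s := (Function.iterate_succ_apply' f i s).symm
      have h2 : f^[i] s :: ((pvOrb f s i).reverse ++ vis)
          = (pvOrb f s (i + 1)).reverse ++ vis := by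
        rw [pvOrb_succ]; simp
      have h3 : len0 + i + 1 = len0 + (i + 1 : Nat) := by push_cast; ring
      rw [h1, h2, h3]
      exact ih k (i + 1) (by omega)
    · simp only [List.mem_append, List.mem_reverse]
      rintro (horb | hvis)
      · obtain ⟨j, hj, hji⟩ := pv_mem_pvOrb.mp horb
        have := pv_orbit_inj U f hmap hinj hs hmin j i (by omega) (by omega) hji
        omega
      · exact pv_orbit_not_vis U f hmap hinj hC hnd hs hsv i hvis

-- one unvisited state processed by A: minimal period found, orbit added, invariants kept
lemma pv_step_specA (U : List PvSt) (f : PvSt → PvSt)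
    (hmap : ∀ s ∈ U, f s ∈ U) (hinj : ∀ a ∈ U, ∀ b ∈ U, f a = f b → a = b)
    {vis : List PvSt} (hC : pvClosed U f vis) (hnd : vis.Nodup)
    {s : PvSt} (hs : s ∈ U) (hsv : s ∉ vis) :
    ∃ p : Nat, 0 < p ∧ p ≤ U.length ∧ f^[p] s = s ∧
      (∀ m, 0 < m → m < p → f^[m] s ≠ s) ∧
      pvWalkA f (U.length + 1) s vis 0 = (s, (p : Int), (pvOrb f s p).reverse ++ vis) ∧
      pvClosed U f ((pvOrb f s p).reverse ++ vis) ∧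
      ((pvOrb f s p).reverse ++ vis).Nodup := by
  obtain ⟨p, hp0, hple, hpp, hmin⟩ := pv_min_period U f hmap hinj hs
  refine ⟨p, hp0, hple, hpp, hmin, ?_, ?_, ?_⟩
  · have hA := pvWalkA_run U f hmap hinj hC hnd hs hsv 0 hp0 hpp hmin
      p (U.length - p) 0 (by omega)
    rw [show p + 1 + (U.length - p) = U.length + 1 by omega] at hA
    simpa [pvOrb] using hA
  · intro x hx
    rw [List.mem_append, List.mem_reverse] at hx
    rcases hx with horb | hvis
    · obtain ⟨i, hip, rfl⟩ := pv_mem_pvOrb.mp horb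
      refine ⟨pv_iter_mem U f hmap hs i, ?_⟩
      rw [List.mem_append, List.mem_reverse]
      left
      have hsucc : f (f^[i] s) = f^[i + 1] s := (Function.iterate_succ_apply' f i s).symm
      rw [hsucc]
      rcases Nat.lt_or_ge (i + 1) p with hlt | hge
      · exact pv_mem_pvOrb.mpr ⟨i + 1, hlt, rfl⟩
      · have : i + 1 = p := by omega
        rw [this, hpp]
        exact pv_mem_pvOrb.mpr ⟨0, hp0, rfl⟩
    · refine ⟨(hC x hvis).1, ?_⟩
      rw [List.mem_append, List.mem_reverse]
      exact Or.inr (hC x hvis).2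
  · refine List.Nodup.append ?_ hnd ?_
    · rw [List.nodup_reverse]
      refine List.Nodup.map_on ?_ (List.nodup_range)
      intro a ha b hb hab
      rw [List.mem_range] at ha hb
      exact pv_orbit_inj U f hmap hinj hs hmin a b ha hb hab
    · intro x hx hx'
      rw [List.mem_reverse] at hx
      obtain ⟨i, _, rfl⟩ := pv_mem_pvOrb.mp hx
      exact pv_orbit_not_vis U f hmap hinj hC hnd hs hsv i hx'

-- ---- B's while-loop: closes at the leader, aborts on a smaller state ----

lemma pvWalkB_run (f : PvSt → PvSt) {s : PvSt} {p : Nat}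
    (hpp : f^[p] s = s) (hmin : ∀ m, 0 < m → m < p → f^[m] s ≠ s)
    (hok : ∀ j, 0 < j → j < p → pvLtB (f^[j] s) s = false) :
    ∀ m k i, 1 ≤ i → i + m = p →
      pvWalkB f s (m + 1 + k) (f^[i] s) (i : Int) = (s, (p : Int)) := by
  intro m
  induction m with
  | zero =>
    intro k i _ hip
    have hi : i = p := by omega
    subst hi
    rw [show 0 + 1 + k = k + 1 by omega]
    simp only [pvWalkB]
    rw [hpp, pvLt_irrefl]
    simp
  | succ m ih =>
    intro k i h1i hip
    rw [show m + 1 + 1 + k = (m + 1 + k) + 1 by omega]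
    simp only [pvWalkB]
    have hgt : pvLtB s (f^[i] s) = true :=
      pvLt_total (hok i (by omega) (by omega)) (fun h => hmin i (by omega) (by omega) h)
    rw [hgt]
    simp only [if_true]
    have h1 : f (f^[i] s) = f^[i + 1] s := (Function.iterate_succ_apply' f i s).symm
    have h3 : (i : Int) + 1 = ((i + 1 : Nat) : Int) := by push_cast; ring
    rw [h1, h3]
    exact ih k (i + 1) (by omega) (by omega)

lemma pvWalkB_fail (f : PvSt → PvSt) {s : PvSt} {p i₀ : Nat}
    (hmin : ∀ m, 0 < m → m < p → f^[m] s ≠ s)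
    (hi0 : 0 < i₀) (hi0p : i₀ < p) (hbad : pvLtB (f^[i₀] s) s = true)
    (hok : ∀ j, 0 < j → j < i₀ → pvLtB (f^[j] s) s = false) :
    ∀ m k i, 1 ≤ i → i + m = i₀ →
      pvWalkB f s (m + 1 + k) (f^[i] s) (i : Int) = (f^[i₀] s, (i₀ : Int)) := by
  intro m
  induction m with
  | zero =>
    intro k i _ hip
    have hi : i = i₀ := by omega
    rw [show 0 + 1 + k = k + 1 by omega, hi]
    simp only [pvWalkB]
    have hno : pvLtB s (f^[i₀] s) = false := by
      by_contra hcon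
      exact pvLt_asymm hbad (by revert hcon; cases pvLtB s (f^[i₀] s) <;> simp)
    rw [hno]
    simp
  | succ m ih =>
    intro k i h1i hip
    rw [show m + 1 + 1 + k = (m + 1 + k) + 1 by omega]
    simp only [pvWalkB]
    have hgt : pvLtB s (f^[i] s) = true :=
      pvLt_total (hok i (by omega) (by omega))
        (fun h => hmin i (by omega) (by omega) h)
    rw [hgt]
    simp only [if_true]
    have h1 : f (f^[i] s) = f^[i + 1] s := (Function.iterate_succ_apply' f i s).symm
    have h3 : (i : Int) + 1 = ((i + 1 : Nat) : Int) := by push_cast; ring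
    rw [h1, h3]
    exact ih k (i + 1) (by omega) (by omega)

-- ---- the state list: membership, nodup, length, strict lexicographic order ----

lemma pv_mem_pvStates (h w : Int) (x : PvSt) :
    x ∈ pvStates h w ↔ 0 ≤ x.1 ∧ x.1 < h ∧ 0 ≤ x.2.1 ∧ x.2.1 < w ∧ 0 ≤ x.2.2 ∧ x.2.2 < 4 := by
  obtain ⟨r, c, d⟩ := x
  simp only [pvStates, List.mem_flatMap, List.mem_map, PySem.List.mem_pyRange_one,
    Prod.mk.injEq]
  constructor
  · rintro ⟨a, ha, b, hb, e, he, rfl, rfl, rfl⟩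
    exact ⟨ha.1, ha.2, hb.1, hb.2, he.1, he.2⟩
  · rintro ⟨h1, h2, h3, h4, h5, h6⟩
    exact ⟨r, ⟨h1, h2⟩, c, ⟨h3, h4⟩, d, ⟨h5, h6⟩, rfl, rfl, rfl⟩

lemma pv_pairwise_pvStates (h w : Int) :
    (pvStates h w).Pairwise (fun a b => pvLtB a b = true) := by
  unfold pvStates
  rw [List.pairwise_flatMap]
  constructor
  · intro r _
    rw [List.pairwise_flatMap]
    constructor
    · intro c _
      rw [List.pairwise_map]
      apply List.Pairwise.imp ?_ (PySem.List.pairwise_lt_pyRange_one 0 4)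
      intro a b hab; simp [pvLtB]; omega
    · apply List.Pairwise.imp ?_ (PySem.List.pairwise_lt_pyRange_one 0 w)
      intro a b hab x hx y hy
      simp only [List.mem_map] at hx hy
      obtain ⟨d1, _, rfl⟩ := hx
      obtain ⟨d2, _, rfl⟩ := hy
      simp [pvLtB]; omega
  · apply List.Pairwise.imp ?_ (PySem.List.pairwise_lt_pyRange_one 0 h)
    intro a b hab x hx y hy
    simp only [List.mem_flatMap, List.mem_map] at hx hy
    obtain ⟨c1, _, d1, _, rfl⟩ := hx
    obtain ⟨c2, _, d2, _, rfl⟩ := hy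
    simp [pvLtB]; omega

lemma pv_length_pvStates (h w : Int) (hh : 0 ≤ h) (hw : 0 ≤ w) :
    (pvStates h w).length = (h * w * 4).toNat := by
  unfold pvStates
  rw [List.length_flatMap]
  have h1 : ∀ r : Int, ((PySem.List.pyRange 0 w 1).flatMap fun c =>
      (PySem.List.pyRange 0 4 1).map fun d => ((r, c, d) : PvSt)).length = w.toNat * 4 := by
    intro r
    rw [List.length_flatMap]
    have h2 : (fun c : Int => ((PySem.List.pyRange 0 4 1).map fun d => ((r, c, d) : PvSt)).length)
        = fun _ => 4 := by
      funext c; simp [PySem.List.length_pyRange_one]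
    simp only [h2]
    rw [List.map_const', List.sum_replicate, PySem.List.length_pyRange_one]
    simp
  simp only [h1]
  rw [List.map_const', List.sum_replicate, PySem.List.length_pyRange_one]
  simp only [smul_eq_mul]
  rcases Int.eq_ofNat_of_zero_le hh with ⟨m, rfl⟩
  rcases Int.eq_ofNat_of_zero_le hw with ⟨n, rfl⟩
  have : ((m : Int) * n * 4).toNat = m * n * 4 := by
    have : ((m : Int) * n * 4) = ((m * n * 4 : Nat) : Int) := by push_cast; ring
    rw [this, Int.toNat_natCast]
  rw [this]
  have : ((m : Int) - 0).toNat = m := by omega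
  rw [this]
  simp [Int.toNat_natCast]
  ring

-- ---- the step map is a permutation of the states ----

lemma pv_step_mem (grid : List String) (h w : Int) {s : PvSt} (hs : s ∈ pvStates h w) :
    pvStep grid h w s ∈ pvStates h w := by
  rw [pv_mem_pvStates] at hs ⊢
  obtain ⟨h1, h2, h3, h4, h5, h6⟩ := hs
  have hh : (0 : Int) < h := lt_of_le_of_lt h1 h2
  have hw : (0 : Int) < w := lt_of_le_of_lt h3 h4
  simp only [pvStep]
  refine ⟨PySem.Int.mod_nonneg _ hh, PySem.Int.mod_lt _ hh,
    PySem.Int.mod_nonneg _ hw, PySem.Int.mod_lt _ hw,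
    PySem.Int.mod_nonneg _ (by norm_num), PySem.Int.mod_lt _ (by norm_num)⟩

lemma pv_mod_cancel {a b m n : Int} (hm : 0 < m) (ha : 0 ≤ a) (ha' : a < m)
    (hb : 0 ≤ b) (hb' : b < m) (hab : PySem.Int.mod (a + n) m = PySem.Int.mod (b + n) m) :
    a = b := by
  rw [PySem.Int.mod_eq_emod_of_pos hm, PySem.Int.mod_eq_emod_of_pos hm] at hab
  rw [Int.emod_eq_emod_iff_emod_sub_eq_zero] at hab
  have hd : m ∣ (a + n - (b + n)) := Int.dvd_of_emod_eq_zero hab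
  have : a + n - (b + n) = a - b := by ring
  rw [this] at hd
  have := Int.eq_zero_of_abs_lt_dvd hd (by rw [abs_lt]; omega)
  omega

lemma pv_step_inj (grid : List String) (h w : Int) :
    ∀ a ∈ pvStates h w, ∀ b ∈ pvStates h w,
      pvStep grid h w a = pvStep grid h w b → a = b := by
  intro a ha b hb hab
  rw [pv_mem_pvStates] at ha hb
  obtain ⟨a1, a2, a3, a4, a5, a6⟩ := ha
  obtain ⟨b1, b2, b3, b4, b5, b6⟩ := hb
  have hh : (0 : Int) < h := lt_of_le_of_lt a1 a2
  have hw : (0 : Int) < w := lt_of_le_of_lt a3 a4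
  simp only [pvStep, Prod.mk.injEq] at hab
  obtain ⟨e1, e2, e3⟩ := hab
  have hd : a.2.2 = b.2.2 := by
    rw [e1, e2] at e3
    rw [PySem.Int.mod_eq_emod_of_pos (by norm_num : (0:Int) < 4),
      PySem.Int.mod_eq_emod_of_pos (by norm_num : (0:Int) < 4)] at e3
    omega
  rw [hd] at e1 e2
  have hr : a.1 = b.1 := pv_mod_cancel hh a1 a2 b1 b2 e1
  have hc : a.2.1 = b.2.1 := pv_mod_cancel hw a3 a4 b3 b4 e2
  exact Prod.ext hr (Prod.ext hc hd)

-- ---- stage 1: A's nested loops equal the flat fold of pvFlatA ----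

lemma pv_levelA_d (U : List PvSt) (f : PvSt → PvSt)
    (hmap : ∀ s ∈ U, f s ∈ U) (hinj : ∀ a ∈ U, ∀ b ∈ U, f a = f b → a = b) :
    ∀ (ds : List Int) (r c : Int) (vis : List PvSt) (ans : List Int),
      (∀ d ∈ ds, ((r, c, d) : PvSt) ∈ U) → pvClosed U f vis → vis.Nodup →
      ∃ vis' ans',
        ds.foldl (pvBodyA f (U.length + 1)) (r, c, vis, ans) = (r, c, vis', ans') ∧
        ds.foldl (fun st d => pvFlatA f (U.length + 1) st (r, c, d)) (vis, ans)
          = (vis', ans') ∧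
        pvClosed U f vis' ∧ vis'.Nodup := by
  intro ds
  induction ds with
  | nil =>
    intro r c vis ans _ hC hnd
    exact ⟨vis, ans, rfl, rfl, hC, hnd⟩
  | cons d ds ih =>
    intro r c vis ans hm hC hnd
    simp only [List.foldl_cons]
    by_cases hmem : ((r, c, d) : PvSt) ∈ vis
    · have hA : pvBodyA f (U.length + 1) (r, c, vis, ans) d = (r, c, vis, ans) := by
        simp only [pvBodyA]
        rw [if_pos hmem]
      have hB : pvFlatA f (U.length + 1) (vis, ans) (r, c, d) = (vis, ans) := by
        simp only [pvFlatA]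
        rw [if_pos hmem]
      rw [hA, hB]
      exact ih r c vis ans (fun d' hd' => hm d' (List.mem_cons_of_mem _ hd')) hC hnd
    · obtain ⟨p, hp0, _, _, _, hwA, hC', hnd'⟩ :=
        pv_step_specA U f hmap hinj hC hnd (hm d List.mem_cons_self) hmem
      have hA : pvBodyA f (U.length + 1) (r, c, vis, ans) d
          = (r, c, (pvOrb f (r, c, d) p).reverse ++ vis, ans ++ [(p : Int)]) := by
        simp only [pvBodyA]
        rw [if_neg hmem]
        simp only [hwA]
        simp
      have hB : pvFlatA f (U.length + 1) (vis, ans) (r, c, d)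
          = ((pvOrb f (r, c, d) p).reverse ++ vis, ans ++ [(p : Int)]) := by
        simp only [pvFlatA]
        rw [if_neg hmem]
        simp only [hwA]
        simp
      rw [hA, hB]
      exact ih r c _ _ (fun d' hd' => hm d' (List.mem_cons_of_mem _ hd')) hC' hnd'

lemma pv_levelA_c (U : List PvSt) (f : PvSt → PvSt)
    (hmap : ∀ s ∈ U, f s ∈ U) (hinj : ∀ a ∈ U, ∀ b ∈ U, f a = f b → a = b) :
    ∀ (cs : List Int) (r : Int) (vis : List PvSt) (ans : List Int),
      (∀ c ∈ cs, ∀ d ∈ PySem.List.pyRange 0 4 1, ((r, c, d) : PvSt) ∈ U) →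
      pvClosed U f vis → vis.Nodup →
      ∃ vis' ans',
        cs.foldl (pvBodyC f (U.length + 1)) (r, vis, ans) = (r, vis', ans') ∧
        cs.foldl (fun st c => (PySem.List.pyRange 0 4 1).foldl
            (fun st2 d => pvFlatA f (U.length + 1) st2 (r, c, d)) st) (vis, ans)
          = (vis', ans') ∧
        pvClosed U f vis' ∧ vis'.Nodup := by
  intro cs
  induction cs with
  | nil =>
    intro r vis ans _ hC hnd
    exact ⟨vis, ans, rfl, rfl, hC, hnd⟩
  | cons c cs ih =>
    intro r vis ans hm hC hnd
    simp only [List.foldl_cons]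
    obtain ⟨vis1, ans1, hA1, hB1, hC1, hnd1⟩ :=
      pv_levelA_d U f hmap hinj (PySem.List.pyRange 0 4 1) r c vis ans
        (hm c List.mem_cons_self) hC hnd
    have hA : pvBodyC f (U.length + 1) (r, vis, ans) c = (r, vis1, ans1) := by
      simp only [pvBodyC]
      rw [hA1]
    rw [hA, hB1]
    exact ih r vis1 ans1 (fun c' hc' => hm c' (List.mem_cons_of_mem _ hc')) hC1 hnd1

lemma pv_levelA_r (U : List PvSt) (f : PvSt → PvSt)
    (hmap : ∀ s ∈ U, f s ∈ U) (hinj : ∀ a ∈ U, ∀ b ∈ U, f a = f b → a = b) (w : Int) :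
    ∀ (rs : List Int) (vis : List PvSt) (ans : List Int),
      (∀ r ∈ rs, ∀ c ∈ PySem.List.pyRange 0 w 1, ∀ d ∈ PySem.List.pyRange 0 4 1,
        ((r, c, d) : PvSt) ∈ U) →
      pvClosed U f vis → vis.Nodup →
      ∃ vis' ans',
        rs.foldl (pvBodyR f (U.length + 1) w) (vis, ans) = (vis', ans') ∧
        rs.foldl (fun st r => (PySem.List.pyRange 0 w 1).foldl
            (fun st2 c => (PySem.List.pyRange 0 4 1).foldl
              (fun st3 d => pvFlatA f (U.length + 1) st3 (r, c, d)) st2) st) (vis, ans)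
          = (vis', ans') ∧
        pvClosed U f vis' ∧ vis'.Nodup := by
  intro rs
  induction rs with
  | nil =>
    intro vis ans _ hC hnd
    exact ⟨vis, ans, rfl, rfl, hC, hnd⟩
  | cons r rs ih =>
    intro vis ans hm hC hnd
    simp only [List.foldl_cons]
    obtain ⟨vis1, ans1, hA1, hB1, hC1, hnd1⟩ :=
      pv_levelA_c U f hmap hinj (PySem.List.pyRange 0 w 1) r vis ans
        (hm r List.mem_cons_self) hC hnd
    have hA : pvBodyR f (U.length + 1) w (vis, ans) r = (vis1, ans1) := by
      simp only [pvBodyR]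
      rw [hA1]
    rw [hA, hB1]
    exact ih vis1 ans1 (fun r' hr' => hm r' (List.mem_cons_of_mem _ hr')) hC1 hnd1

-- ---- prefix of the scan order = lexicographically smaller states ----

lemma pv_prefix_iff (U P : List PvSt) (s : PvSt) (ss' : List PvSt)
    (hsplit : P ++ s :: ss' = U)
    (hpair : U.Pairwise (fun a b => pvLtB a b = true)) :
    ∀ t ∈ U, (t ∈ P ↔ pvLtB t s = true) := by
  rw [← hsplit] at hpair
  rw [List.pairwise_append] at hpair
  obtain ⟨_, hpair2, hcross⟩ := hpair
  intro t ht
  constructor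
  · intro htP
    exact hcross t htP s List.mem_cons_self
  · intro hlt
    rw [← hsplit, List.mem_append] at ht
    rcases ht with htP | hts
    · exact htP
    · rcases List.mem_cons.mp hts with rfl | hts'
      · rw [pvLt_irrefl] at hlt; exact absurd hlt Bool.false_ne_true
      · rw [List.pairwise_cons] at hpair2
        exact absurd hlt (fun hlt => pvLt_asymm hlt (hpair2.1 t hts'))

-- ---- stage 2: flat A fold vs B's leader fold ----

lemma pv_flat (U : List PvSt) (f : PvSt → PvSt)
    (hmap : ∀ s ∈ U, f s ∈ U) (hinj : ∀ a ∈ U, ∀ b ∈ U, f a = f b → a = b)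
    (hpair : U.Pairwise (fun a b => pvLtB a b = true)) :
    ∀ (ss P vis : List PvSt) (ans : List Int),
      P ++ ss = U → pvClosed U f vis → vis.Nodup →
      (∀ x, x ∈ vis ↔ ∃ t ∈ P, ∃ n, f^[n] t = x) →
      (ss.foldl (pvFlatA f (U.length + 1)) (vis, ans)).2
        = ss.foldl (pvBodyBalt f (U.length + 1)) ans := by
  intro ss
  induction ss with
  | nil => intro P vis ans _ _ _ _; rfl
  | cons s ss' ih =>
    intro P vis ans hsplit hC hnd hInv
    have hsU : s ∈ U := by rw [← hsplit]; simp
    have hPU : ∀ t ∈ P, t ∈ U := by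
      intro t ht; rw [← hsplit, List.mem_append]; exact Or.inl ht
    have hpre := pv_prefix_iff U P s ss' hsplit hpair
    have hsplit' : (P ++ [s]) ++ ss' = U := by
      rw [List.append_assoc]; simpa using hsplit
    simp only [List.foldl_cons]
    by_cases hv : s ∈ vis
    · -- A skips; B's walk meets a lexicographically smaller state before closing
      have hA : pvFlatA f (U.length + 1) (vis, ans) s = (vis, ans) := by
        simp only [pvFlatA]; rw [if_pos hv]
      obtain ⟨p, hp0, hple, hpp, hmin⟩ := pv_min_period U f hmap hinj hsU
      obtain ⟨t, htP, n, hnt⟩ := (hInv s).mp hv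
      have htU : t ∈ U := hPU t htP
      have hts : pvLtB t s = true := (hpre t htU).mp htP
      obtain ⟨q, hq0, _, hqq⟩ := pv_exists_period U f hmap hinj htU
      obtain ⟨j, hj⟩ := pv_reach_symm f hq0 hqq hnt
      have hjmod : f^[j % p] s = t := by rw [← pv_iter_mod f hp0 hpp]; exact hj
      have hjne : j % p ≠ 0 := by
        intro h0
        rw [h0] at hjmod
        simp only [Function.iterate_zero, id_eq] at hjmod
        rw [← hjmod, pvLt_irrefl] at hts
        exact Bool.false_ne_true hts
      have hex2 : ∃ i, 0 < i ∧ i < p ∧ pvLtB (f^[i] s) s = true :=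
        ⟨j % p, Nat.pos_of_ne_zero hjne, Nat.mod_lt _ hp0, by rw [hjmod]; exact hts⟩
      obtain ⟨hi₀0, hi₀p, hi₀bad⟩ := Nat.find_spec hex2
      have hok : ∀ j', 0 < j' → j' < Nat.find hex2 → pvLtB (f^[j'] s) s = false := by
        intro j' hj'0 hj'i
        have hmin' := Nat.find_min hex2 hj'i
        rcases Bool.eq_false_or_eq_true (pvLtB (f^[j'] s) s) with ht' | hf
        · exact absurd ⟨hj'0, by omega, ht'⟩ hmin'
        · exact hf
      have hwB := pvWalkB_fail f hmin hi₀0 hi₀p hi₀bad hok (Nat.find hex2 - 1)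
        (U.length + 1 - Nat.find hex2) 1 le_rfl (by omega)
      rw [show Nat.find hex2 - 1 + 1 + (U.length + 1 - Nat.find hex2) = U.length + 1 by
        omega] at hwB
      have hB : pvBodyBalt f (U.length + 1) ans s = ans := by
        simp only [pvBodyBalt]
        have hfs : f s = f^[1] s := by simp
        rw [hfs, show (1 : Int) = ((1 : Nat) : Int) by norm_num, hwB]
        have hne : f^[Nat.find hex2] s ≠ s := by
          intro h0
          rw [h0, pvLt_irrefl] at hi₀bad
          exact Bool.false_ne_true hi₀bad
        simp [hne]
      rw [hA, hB]
      refine ih (P ++ [s]) vis ans hsplit' hC hnd ?_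
      intro x
      constructor
      · intro hx
        obtain ⟨t', ht', n', hn'⟩ := (hInv x).mp hx
        exact ⟨t', by simp [ht'], n', hn'⟩
      · rintro ⟨t', ht', n', hn'⟩
        rcases List.mem_append.mp ht' with ht'P | ht's
        · exact (hInv x).mpr ⟨t', ht'P, n', hn'⟩
        · rw [List.mem_singleton] at ht's
          subst ht's
          refine (hInv x).mpr ⟨t, htP, n' + n, ?_⟩
          rw [Function.iterate_add_apply, hnt, hn']
    · -- A records the minimal period; s is its cycle's leader, so B records it too
      obtain ⟨p, hp0, hple, hpp, hmin, hwA, hC', hnd'⟩ :=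
        pv_step_specA U f hmap hinj hC hnd hsU hv
      have hA : pvFlatA f (U.length + 1) (vis, ans) s
          = ((pvOrb f s p).reverse ++ vis, ans ++ [(p : Int)]) := by
        simp only [pvFlatA]
        rw [if_neg hv]
        simp only [hwA]
        simp
      have hok : ∀ i, 0 < i → i < p → pvLtB (f^[i] s) s = false := by
        intro i hi0 hip
        rcases Bool.eq_false_or_eq_true (pvLtB (f^[i] s) s) with ht' | hf
        case inr => exact hf
        · exfalso
          have htU : f^[i] s ∈ U := pv_iter_mem U f hmap hsU i
          have htP : f^[i] s ∈ P := (hpre _ htU).mpr ht'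
          refine hv ((hInv s).mpr ⟨f^[i] s, htP, p - i, ?_⟩)
          rw [← Function.iterate_add_apply, show p - i + i = p by omega]
          exact hpp
      have hwB := pvWalkB_run f hpp hmin hok (p - 1) (U.length + 1 - p) 1 le_rfl (by omega)
      rw [show p - 1 + 1 + (U.length + 1 - p) = U.length + 1 by omega] at hwB
      have hB : pvBodyBalt f (U.length + 1) ans s = ans ++ [(p : Int)] := by
        simp only [pvBodyBalt]
        have hfs : f s = f^[1] s := by simp
        rw [hfs, show (1 : Int) = ((1 : Nat) : Int) by norm_num, hwB]
        simp
      rw [hA, hB]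
      refine ih (P ++ [s]) _ _ hsplit' hC' hnd' ?_
      intro x
      constructor
      · intro hx
        rw [List.mem_append, List.mem_reverse] at hx
        rcases hx with horb | hvis
        · obtain ⟨i, _, rfl⟩ := pv_mem_pvOrb.mp horb
          exact ⟨s, by simp, i, rfl⟩
        · obtain ⟨t', ht', n', hn'⟩ := (hInv x).mp hvis
          exact ⟨t', by simp [ht'], n', hn'⟩
      · rintro ⟨t', ht', n', hn'⟩
        rw [List.mem_append, List.mem_reverse]
        rcases List.mem_append.mp ht' with ht'P | ht's
        · exact Or.inr ((hInv x).mpr ⟨t', ht'P, n', hn'⟩)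
        · rw [List.mem_singleton] at ht's
          subst ht's
          left
          rw [← hn', pv_iter_mod f hp0 hpp]
          exact pv_mem_pvOrb.mpr ⟨n' % p, Nat.mod_lt _ hp0, rfl⟩

lemma pv_main (grid : List String) : solution grid = solution_alt grid := by
  simp only [solution, solution_alt]
  set h : Int := (grid.length : Int) with hh_def
  set w : Int := PySem.Str.len (PySem.List.pyGetD grid 0 "") with hw_def
  have hh : 0 ≤ h := by positivity
  have hw : 0 ≤ w := by rw [hw_def, PySem.Str.len_eq]; positivity
  have hlen : (h * w * 4).toNat + 1 = (pvStates h w).length + 1 := by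
    rw [pv_length_pvStates h w hh hw]
  set f := pvStep grid h w with hf_def
  set U := pvStates h w with hU_def
  have hmap : ∀ s ∈ U, f s ∈ U := fun s hs => pv_step_mem grid h w hs
  have hinj := pv_step_inj grid h w
  have hmem : ∀ r ∈ PySem.List.pyRange 0 h 1, ∀ c ∈ PySem.List.pyRange 0 w 1,
      ∀ d ∈ PySem.List.pyRange 0 4 1, ((r, c, d) : PvSt) ∈ U := by
    intro r hr c hc d hd
    rw [hU_def, pv_mem_pvStates]
    rw [PySem.List.mem_pyRange_one] at hr hc hd
    exact ⟨hr.1, hr.2, hc.1, hc.2, hd.1, hd.2⟩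
  obtain ⟨vis', ans', hA, hFlat, hC', hnd'⟩ :=
    pv_levelA_r U f hmap hinj w (PySem.List.pyRange 0 h 1) [] []
      hmem (by intro x hx; cases hx) List.nodup_nil
  rw [hlen] at *
  rw [hA]
  have hFlatStates : (U.foldl (pvFlatA f (U.length + 1)) ([], [])) = (vis', ans') := by
    rw [← hFlat]
    simp only [hU_def, pvStates, List.foldl_flatMap, List.foldl_map]
  have hBflat := pv_flat U f hmap hinj (by rw [hU_def]; exact pv_pairwise_pvStates h w)
    U [] [] [] rfl (by intro x hx; cases hx) List.nodup_nil (by intro x; simp)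
  rw [hFlatStates] at hBflat
  have hBnested : U.foldl (pvBodyBalt f (U.length + 1)) []
      = (PySem.List.pyRange 0 h 1).foldl (fun ans r =>
          (PySem.List.pyRange 0 w 1).foldl (fun ans c =>
            (PySem.List.pyRange 0 4 1).foldl
              (fun ans d => pvBodyBalt f (U.length + 1) ans (r, c, d)) ans) ans) [] := by
    simp only [hU_def, pvStates, List.foldl_flatMap, List.foldl_map]
  rw [hBnested] at hBflat
  rw [← hBflat]

-- ===== VERDICT (by name: the statement is the Claim_ definition above) =====
theorem solution_spec : Claim_equal_solution := by
  intro grid _ _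
  unfold Spec_solution
  exact pv_main grid
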